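-- pv_equiv track=rewrite | github.com/jwyang21/coding-test | 프로그래머스/unrated/135808. 과일 장수/과일 장수.py | solution
-- ===== SOURCE A (Python) =====
-- def solution(k, m, score):
--     answer = 0
--     score = sorted(score, reverse = True) # 내림차순 정렬
--
--     for i in range(0, len(score), m):
--         # 0부터 len(score)-1까지 m개씩 자름
--         current_box = score[i:i+m]
--         if len(current_box) == m:
--             answer += min(current_box) * m
--
--     return answer
-- ===== SOURCE B (Python) =====
-- def solution(k, m, score):
--     if m <= 0:
--         return 0  # a box must hold at least one fruit: nothing can be sold
--     counts = {}
--     for v in score: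
--         counts[v] = counts.get(v, 0) + 1
--     ans = 0
--     pos = 0
--     for v in sorted(counts, reverse=True):
--         c = counts[v]
--         # positions [pos, pos+c) of the descending order all hold value v;
--         # a box minimum sits at every position t*m-1, so v is the minimum of
--         # (pos+c)//m - pos//m boxes
--         ans += v * ((pos + c) // m - pos // m)
--         pos += c
--     return ans * m
-- ===== Notes on version B (the rewrite author's own statement) =====
-- stated objective: alternative
-- what changed: B never slices boxes or scans them with min(): it builds a frequency dict, walks the distinct scores in descending order, and for each value computes arithmetically (by floor division of the running position) how many box minima fall inside its run, so no per-box work is done at all.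
import Mathlib
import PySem

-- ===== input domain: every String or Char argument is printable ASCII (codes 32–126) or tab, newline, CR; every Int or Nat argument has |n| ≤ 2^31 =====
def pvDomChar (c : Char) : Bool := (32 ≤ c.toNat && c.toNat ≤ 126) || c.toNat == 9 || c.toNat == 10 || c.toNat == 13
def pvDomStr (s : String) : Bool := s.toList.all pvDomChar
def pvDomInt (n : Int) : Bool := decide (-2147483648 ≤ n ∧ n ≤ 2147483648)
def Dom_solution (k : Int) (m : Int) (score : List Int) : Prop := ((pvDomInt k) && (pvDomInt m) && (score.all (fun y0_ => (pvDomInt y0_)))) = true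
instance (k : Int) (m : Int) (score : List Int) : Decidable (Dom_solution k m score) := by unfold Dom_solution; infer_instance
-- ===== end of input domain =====

-- B replaces A's sort + per-box slice-and-min scan by a frequency dict walked over the
-- distinct scores in descending order, counting arithmetically (via floor division of the
-- running position) how many box minima fall inside each value's run.

-- ===== PORT A =====
def solution (k : Int) (m : Int) (score : List Int) : Int :=
  let s := PySem.List.sorted score (fun x => x) true
  (PySem.List.pyRange 0 (PySem.List.len s) m).foldl
    (fun answer i =>
      let currentBox := PySem.List.slice s (some i) (some (i + m))
      if PySem.List.len currentBox = m then
        answer + (PySem.List.min? currentBox (fun x => x)).getD 0 * m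
      else answer) 0

-- ===== PORT B =====
def solution_alt (k : Int) (m : Int) (score : List Int) : Int :=
  if m ≤ 0 then 0
  else
    let counts := score.foldl (fun d v => d.insert v (d.getD v 0 + 1)) PySem.Dict.empty
    let r := (PySem.List.sorted counts.keys (fun x => x) true).foldl
      (fun (st : Int × Int) v =>
        let c := counts.getD v 0
        (st.1 + v * (PySem.Int.floordiv (st.2 + c) m - PySem.Int.floordiv st.2 m), st.2 + c))
      (0, 0)
    r.1 * m

-- ===== PRECONDITION & SPEC =====
-- m = 0 is excluded: there Python A raises ValueError (range step 0).
def Pre_solution (k : Int) (m : Int) (score : List Int) : Prop := m ≠ 0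
instance (k : Int) (m : Int) (score : List Int) : Decidable (Pre_solution k m score) := by unfold Pre_solution; infer_instance
def pvWitness_solution : Int × Int × List Int := (0, 2, [1, 2, 3])

def Spec_solution (k : Int) (m : Int) (score : List Int) (out : Int) : Prop := out = solution_alt k m score
instance (k : Int) (m : Int) (score : List Int) (out : Int) : Decidable (Spec_solution k m score out) := by unfold Spec_solution; infer_instance

-- ===== CLAIM (what is proved, stated in full; the proofs are below) =====
def Claim_equal_solution : Prop := ∀ (k : Int) (m : Int) (score : List Int), Dom_solution k m score → Pre_solution k m score → Spec_solution k m score (solution k m score)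

-- ===== LEMMAS AND PROOFS =====

-- the minimum of a nonempty descending list is its last element
theorem min_desc_getLast (l : List Int) (h : l ≠ []) (hp : l.Pairwise (fun a b => b ≤ a)) :
    (PySem.List.min? l (fun x => x)).getD 0 = l.getLast h := by
  obtain ⟨v, hv⟩ : ∃ v, PySem.List.min? l (fun x => x) = some v := by
    cases hmin : PySem.List.min? l (fun x => x) with
    | none => exact absurd ((PySem.List.min?_eq_none_iff l _).mp hmin) h
    | some v => exact ⟨v, rfl⟩
  rw [hv, Option.getD_some]
  have hvmem := PySem.List.min?_mem hv
  have hlast_mem : l.getLast h ∈ l := List.getLast_mem h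
  have h1 : v ≤ l.getLast h := PySem.List.min?_isMin hv _ hlast_mem
  obtain ⟨i, hi, hvi⟩ := List.getElem_of_mem hvmem
  have hlast : l.getLast h = l[l.length - 1] := List.getLast_eq_getElem h
  have h2 : l.getLast h ≤ v := by
    rw [hlast, ← hvi]
    rcases Nat.lt_or_ge i (l.length - 1) with hlt | hge
    · exact (List.pairwise_iff_getElem.mp hp) i (l.length - 1) hi (by omega) hlt
    · exact le_of_eq (by congr 1; omega)
  omega

-- A's loop body on a full box of a descending list yields the box's last element
theorem box_term (s : List Int) (hp : s.Pairwise (fun a b => b ≤ a)) (M : Nat) (hM : 0 < M)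
    (j : Nat) (hj : j + M ≤ s.length) :
    (PySem.List.min? ((s.drop j).take M) (fun x => x)).getD 0 = s.getD (j + M - 1) 0 := by
  have hlen : ((s.drop j).take M).length = M := by
    simp [List.length_take, List.length_drop]; omega
  have hne : (s.drop j).take M ≠ [] := by
    intro hcon; rw [hcon] at hlen; simp at hlen; omega
  have hpair : ((s.drop j).take M).Pairwise (fun a b => b ≤ a) :=
    List.Pairwise.take (List.Pairwise.drop hp)
  rw [min_desc_getLast _ hne hpair, List.getLast_eq_getElem hne,
    List.getD_eq_getElem s 0 (by omega : j + M - 1 < s.length)]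
  have h1 : ((s.drop j).take M)[((s.drop j).take M).length - 1]'(by omega) =
      s[j + (M - 1)]'(by omega) := by
    simp only [hlen]
    rw [List.getElem_take, List.getElem_drop]
  rw [h1]
  congr 1
  omega

-- A's conditional accumulation over any index list is a sum over that list
theorem A_foldl_eq (s : List Int) (M : Int) (l : List Int) (a : Int) :
    l.foldl (fun answer i =>
      if PySem.List.len (PySem.List.slice s (some i) (some (i + M))) = M then
        answer + (PySem.List.min? (PySem.List.slice s (some i) (some (i + M))) (fun x => x)).getD 0 * M
      else answer) a
    = a + (l.map (fun i =>
      if PySem.List.len (PySem.List.slice s (some i) (some (i + M))) = M then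
        (PySem.List.min? (PySem.List.slice s (some i) (some (i + M))) (fun x => x)).getD 0 * M
      else 0)).sum := by
  induction l generalizing a with
  | nil => simp
  | cons x t ih =>
    simp only [List.foldl_cons, List.map_cons, List.sum_cons]
    rw [ih]
    split <;> ring

theorem list_sum_range_eq (f : Nat → Int) (q : Nat) :
    ((List.range q).map f).sum = ∑ j ∈ Finset.range q, f j := by
  induction q with
  | zero => simp
  | succ n ih => rw [List.range_succ, Finset.sum_range_succ]; simp [ih]

-- A's value, as M times the sum of the directly indexed box minima (m = M > 0)
theorem A_eq_boxSum (k : Int) (score : List Int) (M : Nat) (hM : 0 < M) :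
    solution k (M : Int) score
      = (∑ j ∈ Finset.range ((PySem.List.sorted score (fun x => x) true).length / M),
          (PySem.List.sorted score (fun x => x) true).getD (M * j + M - 1) 0) * (M : Int) := by
  simp only [solution]
  set s := PySem.List.sorted score (fun x => x) true with hs
  have hp : s.Pairwise (fun a b : Int => b ≤ a) := PySem.List.sorted_pairwise_rev score _
  have hMpos : (0:Int) < (M:Int) := by exact_mod_cast hM
  set q : Nat := s.length / M with hq
  have hdm : M * q + s.length % M = s.length := by rw [hq]; exact Nat.div_add_mod s.length M
  have hmodlt : s.length % M < M := Nat.mod_lt s.length hM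
  rw [A_foldl_eq, zero_add, PySem.List.len_eq,
    PySem.List.pyRange_of_pos 0 ((s.length : Int)) hMpos, List.map_map]
  set c : Nat := (if (0:Int) < ((s.length : Int)) then (((s.length : Int) - 0 + (M:Int) - 1) / (M:Int)).toNat else 0) with hc
  have hqc : q ≤ c := by
    by_cases h0 : 0 < s.length
    · have hceq : c = (s.length + M - 1) / M := by
        rw [hc, if_pos (by exact_mod_cast h0)]
        rw [show ((s.length : Int) - 0 + (M:Int) - 1) = (((s.length + M - 1 : Nat)) : Int) from by
            push_cast [Nat.cast_sub (by omega : 1 ≤ s.length + M)]; ring,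
          ← Int.natCast_div, Int.toNat_natCast]
      rw [hceq, hq]
      exact Nat.div_le_div_right (by omega)
    · simp [hq, show s.length = 0 from by omega]
  clear_value q c
  clear hc
  have hterm : (List.range c).map ((fun i =>
      if PySem.List.len (PySem.List.slice s (some i) (some (i + (M:Int)))) = (M:Int) then
        (PySem.List.min? (PySem.List.slice s (some i) (some (i + (M:Int)))) (fun x => x)).getD 0 * (M:Int)
      else 0) ∘ (fun k : Nat => 0 + (M:Int) * (k:Int)))
      = (List.range c).map (fun j : Nat => if j < q then s.getD (M * j + M - 1) 0 * (M:Int) else 0) := by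
    refine List.map_congr_left ?_
    intro j _
    simp only [Function.comp]
    rw [show (0 + (M:Int) * (j:Int)) = ((M * j : Nat) : Int) from by push_cast; ring,
      PySem.List.slice_natCast_add s (M * j) M, PySem.List.len_eq,
      List.length_take, List.length_drop]
    by_cases hjq : j < q
    · have h1 : M * (j + 1) ≤ M * q := Nat.mul_le_mul_left M (by omega)
      have h2 : M * (j + 1) = M * j + M := by ring
      have hfull : M * j + M ≤ s.length := by omega
      rw [if_pos (by exact_mod_cast (show min M (s.length - M * j) = M from by omega)),
        if_pos hjq, box_term s hp M hM (M * j) hfull]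
    · have h1 : M * q ≤ M * j := Nat.mul_le_mul_left M (by omega)
      have hnot : min M (s.length - M * j) ≠ M := by omega
      rw [if_neg (by exact_mod_cast hnot), if_neg hjq]
  rw [hterm, show c = q + (c - q) from by omega, List.range_add, List.map_append, List.map_map,
    List.sum_append,
    List.sum_eq_zero (l := ((List.range (c - q)).map ((fun j : Nat => if j < q then s.getD (M * j + M - 1) 0 * (M:Int) else 0) ∘ (fun x : Nat => q + x)))) (by
      intro x hx
      simp only [List.mem_map, Function.comp] at hx
      obtain ⟨y, _, hy⟩ := hx
      rw [if_neg (by omega)] at hy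
      exact hy.symm), add_zero]
  have hA2 : (List.range q).map (fun j : Nat => if j < q then s.getD (M * j + M - 1) 0 * (M:Int) else 0)
      = (List.range q).map (fun j : Nat => s.getD (M * j + M - 1) 0 * (M:Int)) := by
    refine List.map_congr_left ?_
    intro j hj
    rw [if_pos (List.mem_range.mp hj)]
  rw [hA2, list_sum_range_eq, ← Finset.sum_mul]


theorem count_flatMap_replicate (L : List Int) (cnt : Int → Nat) (hnd : L.Nodup) (v : Int) :
    (L.flatMap fun u => List.replicate (cnt u) u).count v = if v ∈ L then cnt v else 0 := by
  induction L with
  | nil => simp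
  | cons u t ih =>
    have hnd' := (List.nodup_cons.mp hnd).2
    have hu : u ∉ t := (List.nodup_cons.mp hnd).1
    simp only [List.flatMap_cons, List.count_append, List.count_replicate, ih hnd', List.mem_cons]
    by_cases hvu : v = u
    · subst hvu; simp [hu]
    · simp [hvu, Ne.symm hvu]

theorem sorted_eq_flatMap (score : List Int) :
    PySem.List.sorted score (fun x => x) true
      = (PySem.List.sorted (PySem.Set.ofList score) (fun x => x) true).flatMap
          (fun v => List.replicate (score.count v) v) := by
  set K := PySem.List.sorted (PySem.Set.ofList score) (fun x => x) true with hK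
  have hKnd : K.Nodup := by
    have hp := PySem.List.sorted_perm (PySem.Set.ofList score) (fun x : Int => x) true
    exact hp.nodup_iff.mpr (PySem.Set.nodup_ofList score)
  have hKpw : K.Pairwise (fun a b : Int => b ≤ a) :=
    PySem.List.sorted_pairwise_rev (PySem.Set.ofList score) _
  have hKlt : K.Pairwise (fun a b : Int => b < a) := by
    have := hKpw.and hKnd
    exact this.imp (fun ⟨h1, h2⟩ => lt_of_le_of_ne h1 (Ne.symm h2))
  -- the flatMap is a permutation of score
  have hperm : (K.flatMap fun v => List.replicate (score.count v) v).Perm score := by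
    rw [List.perm_iff_count]
    intro v
    rw [count_flatMap_replicate K _ hKnd v]
    by_cases hv : v ∈ score
    · rw [if_pos]
      rw [hK, PySem.List.mem_sorted]
      exact (PySem.Set.mem_ofList _ _).mpr hv
    · rw [if_neg, List.count_eq_zero_of_not_mem hv]
      rw [hK, PySem.List.mem_sorted]
      exact fun h => hv ((PySem.Set.mem_ofList _ _).mp h)
  -- the flatMap is sorted descending
  have hsorted : (K.flatMap fun v => List.replicate (score.count v) v).Pairwise
      (fun a b : Int => b ≤ a) := by
    rw [List.flatMap_def, List.pairwise_flatten]
    constructor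
    · intro l' hl'
      obtain ⟨u, _, rfl⟩ := List.mem_map.mp hl'
      exact List.pairwise_replicate.mpr (Or.inr le_rfl)
    · rw [List.pairwise_map]
      refine hKlt.imp_of_mem ?_
      intro a b _ _ hab x hx y hy
      rw [List.eq_of_mem_replicate hx, List.eq_of_mem_replicate hy]
      exact hab.le
  -- two sorted permutations of the same list are equal
  have hperm2 : (PySem.List.sorted score (fun x => x) true).Perm
      (K.flatMap fun v => List.replicate (score.count v) v) :=
    (PySem.List.sorted_perm score (fun x => x) true).trans hperm.symm
  exact List.Perm.eq_of_pairwise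
    (fun a b _ _ h1 h2 => le_antisymm h2 h1)
    (PySem.List.sorted_pairwise_rev score _) hsorted hperm2

-- B's fold over descending distinct-value blocks, as a sum of directly indexed box minima
theorem fold_blocks (M : Nat) (hM : 0 < M) (S : List Int) (cnt : Int → Nat) :
    ∀ (L : List Int) (p : Nat) (ans : Int), p ≤ S.length →
      S.drop p = L.flatMap (fun v => List.replicate (cnt v) v) →
      L.foldl (fun (st : Int × Int) v =>
          (st.1 + v * (PySem.Int.floordiv (st.2 + ((cnt v : Nat) : Int)) (M : Int)
                        - PySem.Int.floordiv st.2 (M : Int)), st.2 + ((cnt v : Nat) : Int)))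
        (ans, (p : Int))
      = (ans + ∑ t ∈ Finset.Ico (p / M + 1) (S.length / M + 1), S.getD (t * M - 1) 0,
         (S.length : Int)) := by
  intro L
  induction L with
  | nil =>
    intro p ans hp hdrop
    simp only [List.flatMap_nil] at hdrop
    have hpl : p = S.length := by
      have := congrArg List.length hdrop
      simp [List.length_drop] at this
      omega
    subst hpl
    simp
  | cons v L' ih =>
    intro p ans hp hdrop
    simp only [List.flatMap_cons] at hdrop
    set c : Nat := cnt v with hc
    have hlen : S.length - p = c + (L'.flatMap fun u => List.replicate (cnt u) u).length := by
      have := congrArg List.length hdrop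
      simpa [List.length_drop] using this
    have hpc : p + c ≤ S.length := by omega
    have hdrop' : S.drop (p + c) = L'.flatMap fun u => List.replicate (cnt u) u := by
      have h := congrArg (List.drop c) hdrop
      rw [List.drop_drop, List.drop_left' (by simp : (List.replicate c v).length = c)] at h
      exact h
    -- value at every position of the block
    have hval : ∀ i, p ≤ i → i < p + c → S.getD i 0 = v := by
      intro i h1 h2
      have hi : i < S.length := by omega
      have hip : i - p < (S.drop p).length := by simp [List.length_drop]; omega
      have e1 : S[i]'hi = (S.drop p)[i - p]'hip := by
        rw [List.getElem_drop]
        congr 1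
        omega
      have e2 : (S.drop p)[i - p]'hip = v := by
        rw [List.getElem_of_eq hdrop, List.getElem_append_left (by simp; omega)]
        exact List.getElem_replicate _
      rw [List.getD_eq_getElem S 0 hi, e1, e2]
    simp only [List.foldl_cons]
    -- the floordivs are Nat divisions
    have hfd1 : PySem.Int.floordiv ((p : Int) + (c : Int)) (M : Int) = (((p + c) / M : Nat) : Int) := by
      rw [show ((p : Int) + (c : Int)) = (((p + c : Nat)) : Int) from by push_cast; ring]
      exact PySem.Int.floordiv_natCast _ _
    have hfd2 : PySem.Int.floordiv ((p : Int)) ((M : Int)) = ((p / M : Nat) : Int) :=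
      PySem.Int.floordiv_natCast _ _
    rw [show ((p : Int) + ((cnt v : Nat) : Int)) = ((p : Int) + (c : Int)) from by rw [hc]]
    rw [hfd1, hfd2,
      show ((p : Int) + (c : Int)) = (((p + c : Nat)) : Int) from by push_cast; ring,
      ih (p + c) _ hpc hdrop']
    -- arithmetic: contribution of this block + tail sum = total sum
    have hd1 : p / M ≤ (p + c) / M := Nat.div_le_div_right (by omega)
    have hd2 : (p + c) / M ≤ S.length / M := Nat.div_le_div_right hpc
    have hsplit := Finset.sum_Ico_consecutive (fun t => S.getD (t * M - 1) 0)
      (by omega : p / M + 1 ≤ (p + c) / M + 1) (by omega : (p + c) / M + 1 ≤ S.length / M + 1)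
    have hblock : ∑ t ∈ Finset.Ico (p / M + 1) ((p + c) / M + 1), S.getD (t * M - 1) 0
        = v * (((p + c) / M : Nat) - ((p / M : Nat) : Int)) := by
      have hconst : ∀ t ∈ Finset.Ico (p / M + 1) ((p + c) / M + 1), S.getD (t * M - 1) 0 = v := by
        intro t ht
        obtain ⟨h1, h2⟩ := Finset.mem_Ico.mp ht
        have htM1 : p < t * M := (Nat.div_lt_iff_lt_mul hM).mp (by omega)
        have htM2 : t * M ≤ p + c := (Nat.le_div_iff_mul_le hM).mp (by omega)
        exact hval (t * M - 1) (by omega) (by omega)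
      rw [Finset.sum_congr rfl hconst, Finset.sum_const, Nat.card_Ico, nsmul_eq_mul]
      have : ((p + c) / M + 1 - (p / M + 1)) = (p + c) / M - p / M := by omega
      rw [this, mul_comm]
      congr 1
      push_cast [Nat.cast_sub hd1]
      ring
    rw [Prod.mk.injEq]
    constructor
    · rw [← hsplit, hblock]; ring
    · rfl

-- degenerate case: m < 0, A's loop is empty
theorem A_neg (k m : Int) (score : List Int) (hm : m < 0) : solution k m score = 0 := by
  simp only [solution]
  set s := PySem.List.sorted score (fun x => x) true with hs
  have hA : PySem.List.pyRange 0 (PySem.List.len s) m = [] := by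
    rw [PySem.List.len_eq]
    simp only [PySem.List.pyRange, if_neg hm.ne, if_neg (by omega : ¬ (0:Int) < m)]
    rw [if_neg (not_lt.mpr (by positivity : (0:Int) ≤ (s.length : Int)))]
    simp
  rw [hA]
  simp

-- main case: m = M > 0
theorem solution_pos (k : Int) (score : List Int) (M : Nat) (hM : 0 < M) :
    solution k (M : Int) score = solution_alt k (M : Int) score := by
  have hMneg : ¬ ((M : Int) ≤ 0) := by
    rw [not_le]
    exact_mod_cast hM
  simp only [solution_alt, if_neg hMneg]
  rw [PySem.Dict.foldl_insert_getD_add_one_eq_counter]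
  simp only [PySem.Dict.getD_counter, PySem.Dict.keys_counter]
  have hdrop0 : (PySem.List.sorted score (fun x => x) true).drop 0
      = (PySem.List.sorted (PySem.Set.ofList score) (fun x => x) true).flatMap
          (fun v => List.replicate (score.count v) v) := by
    rw [List.drop_zero]
    exact sorted_eq_flatMap score
  have hfold := fold_blocks M hM (PySem.List.sorted score (fun x => x) true)
      (fun v => score.count v)
      (PySem.List.sorted (PySem.Set.ofList score) (fun x => x) true) 0 0 (by omega) hdrop0
  rw [Nat.cast_zero] at hfold
  rw [hfold, A_eq_boxSum k score M hM]
  congr 1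
  rw [zero_add, Nat.zero_div, Finset.sum_Ico_eq_sum_range]
  simp only [Nat.add_sub_cancel]
  refine Finset.sum_congr rfl ?_
  intro j _
  congr 1
  have : (0 + 1 + j) * M = M * j + M := by ring
  omega

-- ===== VERDICT (by name: the statement is the Claim_ definition above) =====
theorem solution_spec : Claim_equal_solution := by
  intro k m score _ hpre
  unfold Spec_solution
  rcases lt_trichotomy m 0 with hm | hm | hm
  · rw [A_neg k m score hm, solution_alt, if_pos hm.le]
  · exact absurd hm hpre
  · have := solution_pos k score m.toNat (by omega)
    rwa [Int.toNat_of_nonneg hm.le] at this
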